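-- pv_equiv track=rewrite | github.com/WWarzecha/Algorithms-and-Data-Structures | Graph Algorithms Implementations/Top_Sort_Mag.py | sortowanie
-- ===== SOURCE A (Python) =====
-- def dfs_rec(v, vis, G, posortowane):
--     vis[v] = True
--     for u in G[v]:
--         if not vis[u]:
--             dfs_rec(u, vis, G, posortowane)
--     posortowane.append(v)
--
-- def sortowanie(G):
--     n = len(G)
--     vis = [False for _ in range(n)]
--     posortowowane = []
--     for v in range(n):
--         if not vis[v]:
--             dfs_rec(v, vis, G, posortowowane)
--     for i in range(n - 1, 0, -1):
--         if posortowowane[i - 1] not in G[posortowowane[i]]: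
--             return False
--     return True
-- ===== SOURCE B (Python) =====
-- def sortowanie(G):
--     n = len(G)
--     vis = [False] * n
--     posortowowane = []
--     for v in range(n):
--         if vis[v]:
--             continue
--         vis[v] = True
--         stack = [(v, iter(G[v]))]
--         while stack:
--             w, it = stack[-1]
--             for u in it:
--                 if not vis[u]:
--                     vis[u] = True
--                     stack.append((u, iter(G[u])))
--                     break
--             else:
--                 posortowowane.append(w)
--                 stack.pop()
--     for i in range(n - 1, 0, -1):
--         if posortowowane[i - 1] not in G[posortowowane[i]]:
--             return False
--     return True
-- ===== Notes on version B (the rewrite author's own statement) =====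
-- stated objective: alternative
-- what changed: The recursive DFS (dfs_rec) is replaced by an iterative DFS over an explicit stack of (vertex, remaining-neighbours) frames that yields the identical post-order without recursion; the outer loop and the final reverse verification pass are kept.
import Mathlib
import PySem

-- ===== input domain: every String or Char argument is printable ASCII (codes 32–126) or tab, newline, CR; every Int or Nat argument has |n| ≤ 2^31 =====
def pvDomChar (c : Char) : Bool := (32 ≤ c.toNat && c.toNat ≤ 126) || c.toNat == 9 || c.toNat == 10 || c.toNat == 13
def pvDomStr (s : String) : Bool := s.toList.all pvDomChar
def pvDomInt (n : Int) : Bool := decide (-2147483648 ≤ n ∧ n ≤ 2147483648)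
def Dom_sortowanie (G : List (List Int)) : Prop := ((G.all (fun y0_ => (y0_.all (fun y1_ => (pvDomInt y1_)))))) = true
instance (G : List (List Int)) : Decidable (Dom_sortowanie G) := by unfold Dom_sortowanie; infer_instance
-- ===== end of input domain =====

-- B replaces A's recursive DFS with an iterative DFS over an explicit stack of
-- (vertex, remaining-neighbours) frames (same post-order, same final check); objective: alternative.

-- ===== PORT A =====
-- shared helpers: Python's vis[v] read (default irrelevant under Pre_) and vis[v] = True
def getVis (vis : List Bool) (v : Int) : Bool := PySem.List.pyGetD vis v true

def setVis (vis : List Bool) (v : Int) : List Bool := PySem.List.pySetD vis v true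

def nbrs (G : List (List Int)) (v : Int) : List Int := PySem.List.pyGetD G v []

-- dfs_rec, with a fuel argument as a totality guard only (fuel n+1 is never
-- exhausted: each nested call flips one vis entry from false to true)
mutual
def dfsA (G : List (List Int)) (fuel : Nat) (v : Int) (vis : List Bool) (post : List Int) :
    List Bool × List Int :=
  match fuel with
  | 0 => (vis, post)
  | f + 1 =>
    let r := dfsFold G f (nbrs G v) (setVis vis v) post
    (r.1, r.2 ++ [v])
termination_by (fuel, 0)

def dfsFold (G : List (List Int)) (fuel : Nat) (us : List Int) (vis : List Bool)
    (post : List Int) : List Bool × List Int :=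
  match us with
  | [] => (vis, post)
  | u :: rest =>
    if !(getVis vis u) then
      let r := dfsA G fuel u vis post
      dfsFold G fuel rest r.1 r.2
    else
      dfsFold G fuel rest vis post
termination_by (fuel, us.length + 1)
end

-- the outer 'for v in range(n)' loop of A
def outerA (G : List (List Int)) : List Int → List Bool → List Int → List Bool × List Int
  | [], vis, post => (vis, post)
  | v :: vs, vis, post =>
    if !(getVis vis v) then
      let r := dfsA G (G.length + 1) v vis post
      outerA G vs r.1 r.2
    else
      outerA G vs vis post

-- the final 'for i in range(n-1, 0, -1)' verification loop (identical in A and B)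
def checkLoop (G : List (List Int)) (post : List Int) : List Int → Bool
  | [] => true
  | i :: rest =>
    if PySem.List.pyGetD post (i - 1) 0 ∈ nbrs G (PySem.List.pyGetD post i 0) then
      checkLoop G post rest
    else
      false

def sortowanie (G : List (List Int)) : Bool :=
  checkLoop G
    (outerA G (PySem.List.pyRange 0 (G.length : Int) 1) (List.replicate G.length false) []).2
    (PySem.List.pyRange ((G.length : Int) - 1) 0 (-1))

-- ===== PORT B =====
-- needed by loopB's termination: marking an unvisited vertex shrinks the false-count
theorem countF_setVis_succ (vis : List Bool) (v : Int) (h : getVis vis v = false) :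
    (setVis vis v).count false + 1 = vis.count false := by
  unfold getVis PySem.List.pyGetD PySem.List.pyGet? at h
  unfold setVis PySem.List.pySetD PySem.List.pySet?
  cases hk : PySem.List.pyIdx? vis.length v with
  | none => simp [hk] at h
  | some k =>
    simp only [hk, Option.bind_some] at h
    cases hv : vis[k]? with
    | none => simp [hv] at h
    | some b =>
      have hb : b = false := by simpa [hv] using h
      subst hb
      have hklen : k < vis.length := (List.getElem?_eq_some_iff.mp hv).1
      have hget : vis[k] = false := by
        simpa [List.getElem?_eq_getElem hklen] using hv
      have hpos : 0 < vis.count false :=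
        List.count_pos_iff.mpr (hget ▸ List.getElem_mem hklen)
      simp only [Option.map_some, Option.getD_some]
      rw [List.count_set hklen]
      simp [hget]
      omega

theorem countF_setVis_lt (vis : List Bool) (v : Int) (h : getVis vis v = false) :
    (setVis vis v).count false < vis.count false := by
  have := countF_setVis_succ vis v h; omega

-- the iterative DFS loop of B: stack of (vertex, remaining neighbours) frames
def loopB (G : List (List Int)) (S : List (Int × List Int)) (vis : List Bool)
    (post : List Int) : List Bool × List Int :=
  match S with
  | [] => (vis, post)
  | (w, []) :: S' => loopB G S' vis (post ++ [w])
  | (w, u :: rest) :: S' =>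
    if hu : !(getVis vis u) then
      loopB G ((u, nbrs G u) :: (w, rest) :: S') (setVis vis u) post
    else
      loopB G ((w, rest) :: S') vis post
termination_by (vis.count false, (S.map (fun f => f.2.length)).sum, S.length)
decreasing_by
  · exact Prod.Lex.right' _ (by simp) (Prod.Lex.right' _ (by simp) (by simp))
  · exact Prod.Lex.left _ _ (countF_setVis_lt vis u (by simpa using hu))
  · exact Prod.Lex.right' _ (le_refl _) (Prod.Lex.left _ _ (by simp))

-- the outer 'for v in range(n)' loop of B
def outerB (G : List (List Int)) : List Int → List Bool → List Int → List Bool × List Int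
  | [], vis, post => (vis, post)
  | v :: vs, vis, post =>
    if !(getVis vis v) then
      let r := loopB G [(v, nbrs G v)] (setVis vis v) post
      outerB G vs r.1 r.2
    else
      outerB G vs vis post

def sortowanie_alt (G : List (List Int)) : Bool :=
  checkLoop G
    (outerB G (PySem.List.pyRange 0 (G.length : Int) 1) (List.replicate G.length false) []).2
    (PySem.List.pyRange ((G.length : Int) - 1) 0 (-1))

-- ===== PRECONDITION & SPEC =====
-- Pre_: every listed neighbour is a valid Python index into vis/G
-- (otherwise A raises IndexError on vis[u]); A returns normally exactly here.
def Pre_sortowanie (G : List (List Int)) : Prop :=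
  ∀ row ∈ G, ∀ u ∈ row, -(G.length : Int) ≤ u ∧ u < (G.length : Int)

instance (G : List (List Int)) : Decidable (Pre_sortowanie G) := by
  unfold Pre_sortowanie; infer_instance

def pvWitness_sortowanie : List (List Int) := [[1], [0]]

def Spec_sortowanie (G : List (List Int)) (out : Bool) : Prop := out = sortowanie_alt G
instance (G : List (List Int)) (out : Bool) : Decidable (Spec_sortowanie G out) := by
  unfold Spec_sortowanie; infer_instance

-- ===== CLAIM (what is proved, stated in full; the proofs are below) =====
def Claim_equal_sortowanie : Prop :=
  ∀ (G : List (List Int)), Dom_sortowanie G → Pre_sortowanie G →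
    Spec_sortowanie G (sortowanie G)

-- ===== LEMMAS AND PROOFS =====
theorem length_setVis (vis : List Bool) (v : Int) : (setVis vis v).length = vis.length :=
  PySem.List.length_pySetD vis v true

theorem pyIdx?_lt {n : Nat} {i : Int} {k : Nat} (h : PySem.List.pyIdx? n i = some k) :
    k < n := by
  unfold PySem.List.pyIdx? at h
  split_ifs at h <;> simp_all <;> omega

theorem countF_setVis_le (vis : List Bool) (v : Int) :
    (setVis vis v).count false ≤ vis.count false := by
  unfold setVis PySem.List.pySetD PySem.List.pySet?
  cases hk : PySem.List.pyIdx? vis.length v with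
  | none => simp
  | some k =>
    simp only [Option.map_some, Option.getD_some]
    rw [List.count_set (pyIdx?_lt hk)]
    have hlt := pyIdx?_lt hk
    cases hb : vis[k] <;> simp

theorem getVis_of_countF_zero (vis : List Bool) (u : Int) (h : vis.count false = 0) :
    getVis vis u = true := by
  have hnm : false ∉ vis := by
    rw [← List.count_pos_iff]; omega
  unfold getVis PySem.List.pyGetD
  cases hg : PySem.List.pyGet? vis u with
  | none => rfl
  | some b =>
    have := PySem.List.mem_of_pyGet?_eq_some vis hg
    cases b with
    | false => exact absurd this hnm
    | true => rfl

-- dfsA/dfsFold never increase the false-count and preserve vis's length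
theorem dfs_mono (G : List (List Int)) (fuel : Nat) :
    (∀ v vis post, ((dfsA G fuel v vis post).1.count false ≤ vis.count false ∧
        (dfsA G fuel v vis post).1.length = vis.length)) ∧
    (∀ us vis post, ((dfsFold G fuel us vis post).1.count false ≤ vis.count false ∧
        (dfsFold G fuel us vis post).1.length = vis.length)) := by
  induction fuel with
  | zero =>
    refine ⟨fun v vis post => by simp [dfsA], fun us => ?_⟩
    induction us with
    | nil => intro vis post; simp [dfsFold]
    | cons u rest ih =>
      intro vis post
      rw [dfsFold]
      by_cases h : getVis vis u
      · simpa [h] using ih vis post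
      · simpa [h, dfsA] using ih vis post
  | succ f ihf =>
    have hA : ∀ v vis post, ((dfsA G (f + 1) v vis post).1.count false ≤ vis.count false ∧
        (dfsA G (f + 1) v vis post).1.length = vis.length) := by
      intro v vis post
      rw [dfsA]
      have h1 := (ihf.2) (nbrs G v) (setVis vis v) post
      have h2 := countF_setVis_le vis v
      have h3 := length_setVis vis v
      exact ⟨by simpa using le_trans h1.1 h2, by simp [h1.2, h3]⟩
    refine ⟨hA, fun us => ?_⟩
    induction us with
    | nil => intro vis post; simp [dfsFold]
    | cons u rest ih =>
      intro vis post
      rw [dfsFold]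
      by_cases h : getVis vis u
      · simpa [h] using ih vis post
      · have hdA := hA u vis post
        have hrest := ih (dfsA G (f + 1) u vis post).1 (dfsA G (f + 1) u vis post).2
        simp only [h, Bool.not_false, if_true]
        exact ⟨le_trans hrest.1 hdA.1, by rw [hrest.2, hdA.2]⟩

-- simulation: one stack frame of B's loop computes exactly A's dfsFold and the post-append
theorem sim (G : List (List Int)) :
    ∀ (fuel : Nat) (us : List Int) (vis : List Bool) (post : List Int) (v : Int)
      (S : List (Int × List Int)), vis.count false ≤ fuel →
      loopB G ((v, us) :: S) vis post =
        loopB G S (dfsFold G fuel us vis post).1 ((dfsFold G fuel us vis post).2 ++ [v]) := by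
  intro fuel
  induction fuel with
  | zero =>
    intro us
    induction us with
    | nil => intro vis post v S h; rw [loopB]; simp [dfsFold]
    | cons u rest ih =>
      intro vis post v S h
      have hvis : getVis vis u = true := getVis_of_countF_zero vis u (Nat.le_zero.mp h)
      rw [loopB]
      simp only [hvis, Bool.not_true, Bool.false_eq_true, dite_false]
      rw [ih vis post v S h]
      rw [show dfsFold G 0 (u :: rest) vis post = dfsFold G 0 rest vis post from by
        rw [dfsFold]; simp [hvis]]
  | succ f ihf =>
    intro us
    induction us with
    | nil => intro vis post v S h; rw [loopB]; simp [dfsFold]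
    | cons u rest ih =>
      intro vis post v S h
      by_cases hvis : getVis vis u
      · rw [loopB]
        simp only [hvis, Bool.not_true, Bool.false_eq_true, dite_false]
        rw [ih vis post v S h]
        rw [show dfsFold G (f + 1) (u :: rest) vis post = dfsFold G (f + 1) rest vis post from by
          rw [dfsFold]; simp [hvis]]
      · have hvis' : getVis vis u = false := by simpa using hvis
        have hsucc := countF_setVis_succ vis u hvis'
        rw [loopB]
        simp only [hvis', Bool.not_false, dite_true]
        rw [ihf (nbrs G u) (setVis vis u) post u ((v, rest) :: S) (by omega)]
        have hcnt : (dfsFold G f (nbrs G u) (setVis vis u) post).1.count false ≤ f + 1 :=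
          le_trans ((dfs_mono G f).2 _ _ _).1 (by omega)
        rw [ih _ _ v S hcnt]
        rw [show dfsFold G (f + 1) (u :: rest) vis post =
            dfsFold G (f + 1) rest (dfsA G (f + 1) u vis post).1 (dfsA G (f + 1) u vis post).2 from by
          rw [dfsFold]; simp [hvis']]
        rw [show dfsA G (f + 1) u vis post =
            ((dfsFold G f (nbrs G u) (setVis vis u) post).1,
             (dfsFold G f (nbrs G u) (setVis vis u) post).2 ++ [u]) from by rw [dfsA]]

theorem outer_eq (G : List (List Int)) :
    ∀ (vs : List Int) (vis : List Bool) (post : List Int), vis.length = G.length →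
      outerA G vs vis post = outerB G vs vis post := by
  intro vs
  induction vs with
  | nil => intro vis post h; rfl
  | cons v vs ih =>
    intro vis post h
    by_cases hv : getVis vis v
    · simp only [outerA, outerB, hv, Bool.not_true, Bool.false_eq_true, if_false]
      exact ih vis post h
    · have hv' : getVis vis v = false := by simpa using hv
      have hcnt : (setVis vis v).count false ≤ G.length := by
        have h1 := countF_setVis_le vis v
        have h2 := List.count_le_length (l := vis) (a := false)
        omega
      simp only [outerA, outerB, hv', Bool.not_false, if_true]
      rw [sim G G.length (nbrs G v) (setVis vis v) post v [] hcnt]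
      rw [show (loopB G []
          (dfsFold G G.length (nbrs G v) (setVis vis v) post).1
          ((dfsFold G G.length (nbrs G v) (setVis vis v) post).2 ++ [v])) =
          ((dfsFold G G.length (nbrs G v) (setVis vis v) post).1,
           (dfsFold G G.length (nbrs G v) (setVis vis v) post).2 ++ [v]) from by rw [loopB]]
      rw [show dfsA G (G.length + 1) v vis post =
          ((dfsFold G G.length (nbrs G v) (setVis vis v) post).1,
           (dfsFold G G.length (nbrs G v) (setVis vis v) post).2 ++ [v]) from by rw [dfsA]]
      exact ih _ _ (by rw [((dfs_mono G G.length).2 _ _ _).2, length_setVis, h])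

-- ===== VERDICT (by name: the statement is the Claim_ definition above) =====
theorem sortowanie_spec : Claim_equal_sortowanie := by
  intro G _ _
  unfold Spec_sortowanie sortowanie sortowanie_alt
  rw [outer_eq G _ _ _ (by simp)]
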